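-- pv_equiv track=rewrite | github.com/Dwinovo/ACF-Stego | experiments/group5.py | contexts_equal_ignoring_system
-- ===== SOURCE A (Python) =====
-- from typing import Any
--
-- def contexts_equal_ignoring_system(left: list[dict[str, Any]], right: list[dict[str, Any]]) -> bool:
--     def normalize(messages: list[dict[str, Any]]) -> list[dict[str, str]]:
--         normalized: list[dict[str, str]] = []
--         for message in messages:
--             role = str(message.get("role", "")).lower()
--             if role == "system":
--                 continue
--             normalized.append(
--                 {
--                     "role": role,
--                     "content": str(message.get("content", "")),
--                 }
--             )
--         return normalized
--
--     return normalize(left) == normalize(right)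
-- ===== SOURCE B (Python) =====
-- def contexts_equal_ignoring_system(left, right):
--     i, j = 0, 0
--     while True:
--         while i < len(left) and str(left[i].get("role", "")).lower() == "system":
--             i += 1
--         while j < len(right) and str(right[j].get("role", "")).lower() == "system":
--             j += 1
--         if i == len(left) and j == len(right):
--             return True
--         if i == len(left) or j == len(right):
--             return False
--         lm, rm = left[i], right[j]
--         if str(lm.get("role", "")).lower() != str(rm.get("role", "")).lower():
--             return False
--         if str(lm.get("content", "")) != str(rm.get("content", "")):
--             return False
--         i += 1
--         j += 1
-- ===== Notes on version B (the rewrite author's own statement) =====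
-- stated objective: alternative
-- what changed: Replaced the build-two-normalized-lists-then-compare approach with a single interleaved streaming pass using two index cursors that skip system messages and compare role/content pairs in place, allocating no intermediate lists and stopping at the first mismatch.
import Mathlib
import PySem

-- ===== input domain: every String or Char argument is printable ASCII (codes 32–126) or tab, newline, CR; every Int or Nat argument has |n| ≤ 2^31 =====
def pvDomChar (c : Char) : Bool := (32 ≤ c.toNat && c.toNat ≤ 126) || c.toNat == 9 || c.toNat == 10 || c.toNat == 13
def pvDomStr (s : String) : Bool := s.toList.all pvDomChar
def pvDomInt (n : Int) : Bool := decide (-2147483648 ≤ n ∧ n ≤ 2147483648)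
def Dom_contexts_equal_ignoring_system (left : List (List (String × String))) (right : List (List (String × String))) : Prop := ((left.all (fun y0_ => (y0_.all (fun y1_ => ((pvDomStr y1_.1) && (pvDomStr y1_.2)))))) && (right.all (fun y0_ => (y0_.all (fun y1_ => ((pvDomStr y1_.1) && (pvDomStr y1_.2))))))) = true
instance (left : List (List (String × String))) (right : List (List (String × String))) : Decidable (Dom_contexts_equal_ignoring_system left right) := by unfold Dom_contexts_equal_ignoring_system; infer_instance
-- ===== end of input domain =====

-- B replaces build-two-normalized-lists-then-compare by one interleaved two-cursor
-- streaming pass that skips system messages in place (alternative decomposition, same cost).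

-- ===== PORT A =====
-- normalize(messages): collect {"role": role.lower(), "content": str(content)} for non-system messages
def pvNormalize (messages : List (List (String × String))) : List (List (String × String)) :=
  messages.foldl (fun normalized message =>
    let role := PySem.Str.lower ((PySem.Dict.ofList message).getD "role" "")
    if role == "system" then normalized
    else normalized ++ [[("role", role), ("content", (PySem.Dict.ofList message).getD "content" "")]]) []

def contexts_equal_ignoring_system (left : List (List (String × String))) (right : List (List (String × String))) : Bool :=
  pvNormalize left == pvNormalize right

-- ===== PORT B =====
def pvRole (m : List (String × String)) : String :=
  PySem.Str.lower ((PySem.Dict.ofList m).getD "role" "")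

def pvContent (m : List (String × String)) : String :=
  (PySem.Dict.ofList m).getD "content" ""

-- the while-True loop of Source B: each inner 'while' skip step is one recursive call
def pvLoop : List (List (String × String)) → List (List (String × String)) → Bool
  | [], [] => true
  | [], n :: rs => if pvRole n == "system" then pvLoop [] rs else false
  | m :: ls, [] => if pvRole m == "system" then pvLoop ls [] else false
  | m :: ls, n :: rs =>
    if pvRole m == "system" then pvLoop ls (n :: rs)
    else if pvRole n == "system" then pvLoop (m :: ls) rs
    else if pvRole m == pvRole n && pvContent m == pvContent n then pvLoop ls rs
    else false
termination_by l r => l.length + r.length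

def contexts_equal_ignoring_system_alt (left : List (List (String × String))) (right : List (List (String × String))) : Bool :=
  pvLoop left right

-- ===== PRECONDITION & SPEC =====
def Spec_contexts_equal_ignoring_system (left : List (List (String × String))) (right : List (List (String × String))) (out : Bool) : Prop := out = contexts_equal_ignoring_system_alt left right
instance (left : List (List (String × String))) (right : List (List (String × String))) (out : Bool) : Decidable (Spec_contexts_equal_ignoring_system left right out) := by unfold Spec_contexts_equal_ignoring_system; infer_instance

-- ===== CLAIM (what is proved, stated in full; the proofs are below) =====
def Claim_equal_contexts_equal_ignoring_system : Prop := ∀ (left : List (List (String × String))) (right : List (List (String × String))), Dom_contexts_equal_ignoring_system left right → Spec_contexts_equal_ignoring_system left right (contexts_equal_ignoring_system left right)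

-- ===== LEMMAS AND PROOFS =====

-- structural characterisation of A's normalize
def pvNormF : List (List (String × String)) → List (List (String × String))
  | [] => []
  | m :: ms =>
    if pvRole m == "system" then pvNormF ms
    else [("role", pvRole m), ("content", pvContent m)] :: pvNormF ms

theorem pvNormalize_foldl (ms : List (List (String × String)))
    (acc : List (List (String × String))) :
    ms.foldl (fun normalized message =>
      let role := PySem.Str.lower ((PySem.Dict.ofList message).getD "role" "")
      if role == "system" then normalized
      else normalized ++ [[("role", role), ("content", (PySem.Dict.ofList message).getD "content" "")]]) acc
    = acc ++ pvNormF ms := by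
  induction ms generalizing acc with
  | nil => simp [pvNormF]
  | cons m ms ih =>
    simp only [List.foldl, pvNormF, pvRole, pvContent]
    by_cases h : (PySem.Str.lower ((PySem.Dict.ofList m).getD "role" "") == "system") = true
    · rw [if_pos h, if_pos h, ih]
    · rw [if_neg h, if_neg h, ih, List.append_assoc]
      rfl

theorem pvNormalize_eq (ms : List (List (String × String))) :
    pvNormalize ms = pvNormF ms := by
  rw [pvNormalize, pvNormalize_foldl]
  rfl

theorem pvLoop_eq (l r : List (List (String × String))) :
    pvLoop l r = (pvNormF l == pvNormF r) := by
  induction l, r using pvLoop.induct with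
  | case1 => simp [pvLoop, pvNormF]
  | case2 n rs hs ih => simp [pvLoop, pvNormF, hs, ih]
  | case3 n rs hs =>
    simp [pvLoop, pvNormF, hs]
  | case4 m ls hs ih => simp [pvLoop, pvNormF, hs, ih]
  | case5 m ls hs =>
    simp [pvLoop, pvNormF, hs]
  | case6 m ls n rs hs ih => simp [pvLoop, pvNormF, hs, ih]
  | case7 m ls n rs hm hs ih => simp [pvLoop, pvNormF, hm, hs, ih]
  | case8 m ls n rs hm hn heq ih =>
    simp only [Bool.and_eq_true, beq_iff_eq] at heq
    simp [pvLoop, pvNormF, hn, heq.1, heq.2, ih]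
  | case9 m ls n rs hm hn hne =>
    simp only [Bool.and_eq_true, beq_iff_eq, not_and_or] at hne
    rcases hne with h | h <;> simp [pvLoop, pvNormF, hm, hn, h]

-- ===== VERDICT (by name: the statement is the Claim_ definition above) =====
theorem contexts_equal_ignoring_system_spec : Claim_equal_contexts_equal_ignoring_system := by
  intro left right _
  unfold Spec_contexts_equal_ignoring_system contexts_equal_ignoring_system contexts_equal_ignoring_system_alt
  rw [pvNormalize_eq, pvNormalize_eq, pvLoop_eq]
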